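-- pv_equiv track=rewrite | github.com/codeDogMcGee/DeveloperToolsRestApi | rest_api/helpers.py | _get_most_frequent_months
-- ===== SOURCE A (Python) =====
-- from collections import Counter, OrderedDict
--
-- def _get_most_frequent_months(input_list: list[int]) -> list[int]:
--     """
--     Given a list of months, return a list of the months that
--     occur the most in the list. If there is a tie multiple months
--     will be returned
--     """
--     month_list = []
--     if input_list and len(input_list) > 0:
--         most_common = Counter(input_list).most_common()
--         max_occurances = 0
--         for month, occurances in most_common:
--             if occurances < max_occurances:
--                 break
--
--             if max_occurances == 0:
--                 max_occurances = occurances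
--
--             month_list.append(month)
--     return month_list
-- ===== SOURCE B (Python) =====
-- from collections import Counter
--
--
-- def _get_most_frequent_months(input_list: list[int]) -> list[int]:
--     """Return all months occurring most often, ties in first-seen order."""
--     counter = Counter(input_list)
--     if not counter:
--         return []
--     max_count = max(counter.values())
--     return [month for month, count in counter.items() if count == max_count]
-- ===== Notes on version B (the rewrite author's own statement) =====
-- stated objective: simpler
-- what changed: Replaces the sorted most_common() scan with its break sentinel by a direct find-max-then-filter pass over the Counter's insertion-ordered items.
import Mathlib
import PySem

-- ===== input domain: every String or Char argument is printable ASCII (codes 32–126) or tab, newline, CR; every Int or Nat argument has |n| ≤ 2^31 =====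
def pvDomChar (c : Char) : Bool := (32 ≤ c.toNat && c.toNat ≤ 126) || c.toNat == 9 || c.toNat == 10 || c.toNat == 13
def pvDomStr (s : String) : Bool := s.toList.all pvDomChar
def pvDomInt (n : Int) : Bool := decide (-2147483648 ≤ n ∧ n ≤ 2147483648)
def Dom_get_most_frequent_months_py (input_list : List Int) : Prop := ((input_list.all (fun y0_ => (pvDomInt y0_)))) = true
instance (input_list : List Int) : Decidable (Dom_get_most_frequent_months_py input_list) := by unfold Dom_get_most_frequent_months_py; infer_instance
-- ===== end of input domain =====

-- B replaces A's sorted most_common() scan (with its break sentinel) by a direct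
-- find-max-then-filter pass over the Counter's insertion-ordered items (simpler; same results).

-- ===== PORT A =====
-- the 'for month, occurances in most_common: …' loop with its break and the
-- max_occurances sentinel, carrying month_list as accumulator
def pvALoop : List (Int × Int) → Int → List Int → List Int
  | [], _, month_list => month_list
  | (month, occurances) :: rest, max_occurances, month_list =>
    if occurances < max_occurances then month_list
    else
      pvALoop rest (if max_occurances = 0 then occurances else max_occurances)
        (month_list ++ [month])

def get_most_frequent_months_py (input_list : List Int) : List Int :=
  if input_list ≠ [] ∧ 0 < input_list.length then
    -- Counter(input_list).most_common() = items sorted by count descending, stable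
    pvALoop (PySem.List.sorted (PySem.Dict.counter input_list).items (fun p => p.2) true) 0 []
  else []

-- ===== PORT B =====
def get_most_frequent_months_py_alt (input_list : List Int) : List Int :=
  let counter := PySem.Dict.counter input_list
  if counter.items.isEmpty then []
  else
    match PySem.List.max? counter.values (fun v => v) with
    | none => []   -- unreachable: counter is nonempty
    | some max_count =>
      (counter.items.filter (fun p => p.2 == max_count)).map (fun p => p.1)

-- ===== PRECONDITION & SPEC =====
def Spec_get_most_frequent_months_py (input_list : List Int) (out : List Int) : Prop := out = get_most_frequent_months_py_alt input_list
instance (input_list : List Int) (out : List Int) : Decidable (Spec_get_most_frequent_months_py input_list out) := by unfold Spec_get_most_frequent_months_py; infer_instance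

-- ===== CLAIM (what is proved, stated in full; the proofs are below) =====
def Claim_equal_get_most_frequent_months_py : Prop := ∀ (input_list : List Int), Dom_get_most_frequent_months_py input_list → Spec_get_most_frequent_months_py input_list (get_most_frequent_months_py input_list)

-- ===== LEMMAS AND PROOFS =====

-- a list whose counts are all below M contributes nothing to the count-= M filter
theorem pv_filter_nil_of_lt (l : List (Int × Int)) (M : Int)
    (h : ∀ p ∈ l, p.2 < M) : l.filter (fun p => p.2 == M) = [] := by
  rw [List.filter_eq_nil_iff]
  intro p hp
  simpa using Int.ne_of_lt (h p hp)

-- one stable descending insertion: the max-count filter gains x at the end iff x has count M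
theorem pv_filter_insertBy (x : Int × Int) (acc : List (Int × Int)) (M : Int)
    (hpw : acc.Pairwise (fun a b => b.2 ≤ a.2)) :
    (PySem.List.insertBy (fun a b => decide (b.2 < a.2)) x acc).filter (fun p => p.2 == M)
      = acc.filter (fun p => p.2 == M) ++ (if x.2 == M then [x] else []) := by
  induction acc with
  | nil =>
    by_cases hxM : x.2 = M <;> simp [PySem.List.insertBy, hxM]
  | cons y ys ih =>
    rw [List.pairwise_cons] at hpw
    rw [PySem.List.insertBy]
    by_cases hlt : y.2 < x.2
    · simp only [hlt, decide_true, if_true]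
      by_cases hxM : x.2 = M
      · have hnil : (y :: ys).filter (fun p : Int × Int => p.2 == M) = [] := by
          apply pv_filter_nil_of_lt
          intro p hp
          rcases List.mem_cons.mp hp with h | h
          · subst h; omega
          · have := hpw.1 p h; omega
        simp [hxM, hnil]
      · simp [List.filter_cons, hxM]
    · have hd : decide (y.2 < x.2) = false := by simp [hlt]
      rw [hd]
      simp only [Bool.false_eq_true, if_false]
      rw [List.filter_cons, List.filter_cons, ih hpw.2]
      by_cases hyM : y.2 = M <;> simp [hyM]

-- stability, restricted to what the proof needs: the stable descending sort
-- preserves the sublist of maximal-count pairs in order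
theorem pv_filter_sorted (l : List (Int × Int)) (M : Int) :
    (PySem.List.sorted l (fun p => p.2) true).filter (fun p => p.2 == M)
      = l.filter (fun p => p.2 == M) := by
  induction l using List.reverseRecOn with
  | nil => rfl
  | append_singleton l x ih =>
    have hsorted : PySem.List.sorted (l ++ [x]) (fun p : Int × Int => p.2) true
        = PySem.List.insertBy (fun a b => decide (b.2 < a.2)) x
            (PySem.List.sorted l (fun p => p.2) true) := by
      simp [PySem.List.sorted, List.foldl_append]
    rw [hsorted, pv_filter_insertBy x _ M
        (PySem.List.sorted_pairwise_rev l (fun p => p.2))]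
    rw [ih, List.filter_append]
    by_cases hxM : x.2 = M <;> simp [hxM]

-- A's loop after the first iteration: with a positive sentinel bounding all counts,
-- it appends months until the first count below the sentinel
theorem pv_aloop_takeWhile (s : List (Int × Int)) (c : Int) (acc : List Int)
    (hc : 0 < c) (hb : ∀ p ∈ s, p.2 ≤ c) :
    pvALoop s c acc = acc ++ (s.takeWhile (fun p => p.2 == c)).map (fun p => p.1) := by
  induction s generalizing acc with
  | nil => simp [pvALoop]
  | cons p rest ih =>
    obtain ⟨m, occ⟩ := p
    rw [pvALoop]
    by_cases hlt : occ < c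
    · have hne : ¬ ((occ : Int) == c) = true := by simp; omega
      simp [hlt, hne]
    · have heq : occ = c := le_antisymm (hb (m, occ) (by simp)) (by omega)
      have hcne : ¬ c = 0 := by omega
      simp only [hlt, if_false, hcne]
      rw [ih (acc ++ [m]) (fun q hq => hb q (List.mem_cons_of_mem _ hq))]
      simp [heq]

-- in a descending list bounded by M, the count-= M prefix is the whole count-= M sublist
theorem pv_takeWhile_eq_filter (s : List (Int × Int)) (M : Int)
    (hpw : s.Pairwise (fun a b => b.2 ≤ a.2)) (hb : ∀ p ∈ s, p.2 ≤ M) :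
    s.takeWhile (fun p => p.2 == M) = s.filter (fun p => p.2 == M) := by
  induction s with
  | nil => rfl
  | cons y ys ih =>
    rw [List.pairwise_cons] at hpw
    by_cases hyM : y.2 = M
    · rw [List.takeWhile_cons, List.filter_cons]
      simp only [hyM]
      simp [ih hpw.2 (fun p hp => hb p (List.mem_cons_of_mem _ hp))]
    · have hnil : (y :: ys).filter (fun p : Int × Int => p.2 == M) = [] := by
        apply pv_filter_nil_of_lt
        intro p hp
        rcases List.mem_cons.mp hp with h | h
        · rw [h]; exact lt_of_le_of_ne (hb y List.mem_cons_self) hyM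
        · have h1 := hpw.1 p h
          have h2 := lt_of_le_of_ne (hb y List.mem_cons_self) hyM
          omega
      rw [hnil, List.takeWhile_cons]
      simp [hyM]

-- every count recorded by Counter is positive
theorem pv_items_pos (xs : List Int) (p : Int × Int)
    (hp : p ∈ (PySem.Dict.counter xs).items) : 0 < p.2 := by
  rw [PySem.Dict.items_counter] at hp
  obtain ⟨k, hk, rfl⟩ := List.mem_map.mp hp
  have hkx : k ∈ xs := (PySem.Set.mem_ofList xs k).mp hk
  have hc : 0 < xs.count k := List.count_pos_iff.mpr hkx
  show (0 : Int) < (xs.count k : Int)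
  exact_mod_cast hc

-- ===== VERDICT (by name: the statement is the Claim_ definition above) =====
theorem get_most_frequent_months_py_spec : Claim_equal_get_most_frequent_months_py := by
  intro xs _
  unfold Spec_get_most_frequent_months_py get_most_frequent_months_py get_most_frequent_months_py_alt
  by_cases hxs : xs = []
  · subst hxs; rfl
  · have hcond : xs ≠ [] ∧ 0 < xs.length := ⟨hxs, List.length_pos_iff.mpr hxs⟩
    rw [if_pos hcond]
    -- the counter has at least one item
    have hne : (PySem.Dict.counter xs).items ≠ [] := by
      rw [PySem.Dict.items_counter]
      simp only [ne_eq, List.map_eq_nil_iff]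
      intro hS
      obtain ⟨a, as, rfl⟩ := List.exists_cons_of_ne_nil hxs
      have ha : a ∈ PySem.Set.ofList (a :: as) := (PySem.Set.mem_ofList _ _).mpr (by simp)
      rw [hS] at ha
      exact absurd ha (List.not_mem_nil)
    have hempty : (PySem.Dict.counter xs).items.isEmpty = false := by
      simpa [List.isEmpty_iff] using hne
    -- the sorted item list is nonempty; name its head
    cases hs : PySem.List.sorted (PySem.Dict.counter xs).items (fun p => p.2) true with
    | nil =>
      exfalso
      have := PySem.List.length_sorted (PySem.Dict.counter xs).items (fun p : Int × Int => p.2) true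
      rw [hs] at this
      exact hne (List.eq_nil_of_length_eq_zero this.symm)
    | cons m t =>
      obtain ⟨mo, oc⟩ := m
      have hm : (mo, oc) ∈ (PySem.Dict.counter xs).items := by
        have : (mo, oc) ∈ PySem.List.sorted (PySem.Dict.counter xs).items (fun p => p.2) true := by
          rw [hs]; exact List.mem_cons_self
        exact (PySem.List.mem_sorted _ _ _ _).mp this
      have hub : ∀ p ∈ (PySem.Dict.counter xs).items, p.2 ≤ oc := by
        intro p hp
        exact PySem.List.key_head_sorted_rev_ge _ (fun p : Int × Int => p.2) hs p hp
      have hocpos : (0 : Int) < oc := pv_items_pos xs (mo, oc) hm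
      have htb : ∀ p ∈ t, p.2 ≤ oc := by
        intro p hp
        apply hub
        have : p ∈ PySem.List.sorted (PySem.Dict.counter xs).items (fun p => p.2) true := by
          rw [hs]; exact List.mem_cons_of_mem _ hp
        exact (PySem.List.mem_sorted _ _ _ _).mp this
      -- A's side: first loop iteration sets the sentinel to oc, then take-while
      have hA : pvALoop ((mo, oc) :: t) 0 []
          = (((mo, oc) :: t).takeWhile (fun p => p.2 == oc)).map (fun p => p.1) := by
        rw [pvALoop]
        have hnlt : ¬ oc < (0 : Int) := by omega
        rw [if_neg hnlt, if_pos rfl]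
        rw [pv_aloop_takeWhile t oc ([] ++ [mo]) hocpos htb]
        simp
      rw [hA]
      -- the take-while prefix is the max-count filter of the counter items
      have hpw : ((mo, oc) :: t).Pairwise (fun a b : Int × Int => b.2 ≤ a.2) := by
        rw [← hs]; exact PySem.List.sorted_pairwise_rev _ _
      have hbnd : ∀ p ∈ (mo, oc) :: t, p.2 ≤ oc := by
        intro p hp
        rcases List.mem_cons.mp hp with h | h
        · subst h; exact le_refl _
        · exact htb p h
      rw [pv_takeWhile_eq_filter _ oc hpw hbnd, ← hs, pv_filter_sorted _ oc]
      -- B's side: the max of the counter values is oc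
      simp only [hempty, Bool.false_eq_true, if_false]
      have hvne : (PySem.Dict.counter xs).values ≠ [] := by
        simp only [PySem.Dict.values]
        exact fun h => hne (List.map_eq_nil_iff.mp h)
      obtain ⟨v, hv⟩ : ∃ v, PySem.List.max? (PySem.Dict.counter xs).values (fun v => v) = some v := by
        cases h : PySem.List.max? (PySem.Dict.counter xs).values (fun v => v) with
        | none => exact absurd ((PySem.List.max?_eq_none_iff _ _).mp h) hvne
        | some v => exact ⟨v, rfl⟩
      have hvoc : v = oc := by
        have hvmem : v ∈ (PySem.Dict.counter xs).values := PySem.List.max?_mem hv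
        have h1 : v ≤ oc := by
          simp only [PySem.Dict.values] at hvmem
          obtain ⟨p, hp, rfl⟩ := List.mem_map.mp hvmem
          exact hub p hp
        have hocmem : oc ∈ (PySem.Dict.counter xs).values := by
          simp only [PySem.Dict.values]
          exact List.mem_map.mpr ⟨(mo, oc), hm, rfl⟩
        have h2 : oc ≤ v := PySem.List.max?_isMax hv oc hocmem
        omega
      rw [hv, hvoc]
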